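-- pv_equiv track=rewrite | github.com/Aarize29/nlp-prgms | nlp_prgrms.py | simple_noun_phrase_chunking
-- ===== SOURCE A (Python) =====
-- def simple_noun_phrase_chunking(pos_tags):
--     noun_phrases = []
--     current_phrase = []
--     for token, tag in pos_tags:
--         if tag in ['Noun', 'Adjective']:
--             current_phrase.append(token)
--         elif current_phrase:
--             noun_phrases.append(' '.join(current_phrase))
--             current_phrase = []
--     if current_phrase:
--         noun_phrases.append(' '.join(current_phrase))
--     return noun_phrases
-- ===== SOURCE B (Python) =====
-- def simple_noun_phrase_chunking(pos_tags):
--     def keep(tag):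
--         return tag in ('Noun', 'Adjective')
--     phrases = []
--     i, n = 0, len(pos_tags)
--     while i < n:
--         if keep(pos_tags[i][1]):
--             j = i
--             while j < n and keep(pos_tags[j][1]):
--                 j += 1
--             phrases.append(' '.join(tok for tok, _ in pos_tags[i:j]))
--             i = j
--         else:
--             i += 1
--     return phrases
-- ===== Notes on version B (the rewrite author's own statement) =====
-- stated objective: alternative
-- what changed: Replaced A's accumulator loop (growing a current_phrase list and flushing it on non-keep tags and at the end) with a two-pointer run scanner that locates each maximal Noun/Adjective run and joins it directly, with no carried phrase state.
import Mathlib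
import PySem

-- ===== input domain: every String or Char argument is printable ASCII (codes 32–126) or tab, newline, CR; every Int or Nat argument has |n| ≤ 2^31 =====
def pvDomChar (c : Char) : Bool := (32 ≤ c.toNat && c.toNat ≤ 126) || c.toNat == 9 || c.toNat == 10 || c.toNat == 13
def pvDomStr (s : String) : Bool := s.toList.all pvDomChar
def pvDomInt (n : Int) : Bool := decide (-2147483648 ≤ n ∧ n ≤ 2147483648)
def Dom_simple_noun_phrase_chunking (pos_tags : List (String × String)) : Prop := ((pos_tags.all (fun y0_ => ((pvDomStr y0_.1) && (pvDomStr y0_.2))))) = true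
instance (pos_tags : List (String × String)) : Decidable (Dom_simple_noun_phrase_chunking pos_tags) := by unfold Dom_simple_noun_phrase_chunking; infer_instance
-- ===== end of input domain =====

-- B replaces A's flush-on-boundary accumulator loop with a run scanner over maximal Noun/Adjective runs (alternative decomposition, same cost).


-- ===== PORT A =====
-- one loop step: append token to current phrase on Noun/Adjective, else flush current phrase if non-empty
def pvStepA (st : List String × List String) (p : String × String) : List String × List String :=
  if ["Noun", "Adjective"].contains p.2 then (st.1, st.2 ++ [p.1])
  else if st.2 ≠ [] then (st.1 ++ [PySem.Str.join " " st.2], [])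
  else st

def simple_noun_phrase_chunking (pos_tags : List (String × String)) : List String :=
  let r := pos_tags.foldl pvStepA ([], [])
  if r.2 ≠ [] then r.1 ++ [PySem.Str.join " " r.2] else r.1

-- ===== PORT B =====
def pvKeep (tag : String) : Bool := tag == "Noun" || tag == "Adjective"

-- run scanner: at a keep-tag, take the whole maximal keep-run, join it, continue after the run
def simple_noun_phrase_chunking_alt : List (String × String) → List String
  | [] => []
  | (t, g) :: xs =>
    if pvKeep g then
      PySem.Str.join " " (t :: (xs.takeWhile (fun p => pvKeep p.2)).map Prod.fst)
        :: simple_noun_phrase_chunking_alt (xs.dropWhile (fun p => pvKeep p.2))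
    else simple_noun_phrase_chunking_alt xs
termination_by l => l.length
decreasing_by
  · simpa using Nat.lt_succ_of_le (List.length_dropWhile_le _ _)
  · simp

-- ===== PRECONDITION & SPEC =====
def Spec_simple_noun_phrase_chunking (pos_tags : List (String × String)) (out : List String) : Prop := out = simple_noun_phrase_chunking_alt pos_tags
instance (pos_tags : List (String × String)) (out : List String) : Decidable (Spec_simple_noun_phrase_chunking pos_tags out) := by unfold Spec_simple_noun_phrase_chunking; infer_instance

-- ===== CLAIM (what is proved, stated in full; the proofs are below) =====
def Claim_equal_simple_noun_phrase_chunking : Prop := ∀ (pos_tags : List (String × String)), Dom_simple_noun_phrase_chunking pos_tags → Spec_simple_noun_phrase_chunking pos_tags (simple_noun_phrase_chunking pos_tags)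

-- ===== LEMMAS AND PROOFS =====

-- what A produces from a pending current phrase `cur` followed by the remaining input `l`
def pvTail (cur : List String) (l : List (String × String)) : List String :=
  if cur = [] then simple_noun_phrase_chunking_alt l
  else PySem.Str.join " " (cur ++ (l.takeWhile (fun p => pvKeep p.2)).map Prod.fst)
        :: simple_noun_phrase_chunking_alt (l.dropWhile (fun p => pvKeep p.2))

lemma pvMain (l : List (String × String)) : ∀ acc cur,
    (let r := l.foldl pvStepA (acc, cur);
     if r.2 ≠ [] then r.1 ++ [PySem.Str.join " " r.2] else r.1)
    = acc ++ pvTail cur l := by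
  induction l with
  | nil =>
    intro acc cur
    by_cases h : cur = [] <;> simp [pvTail, h, simple_noun_phrase_chunking_alt]
  | cons p xs ih =>
    intro acc cur
    obtain ⟨t, g⟩ := p
    by_cases hk : pvKeep g
    · have hk' : g = "Noun" ∨ g = "Adjective" := by simpa [pvKeep] using hk
      have hstep : pvStepA (acc, cur) (t, g) = (acc, cur ++ [t]) := by
        rcases hk' with h' | h' <;> simp [pvStepA, h']
      simp only [List.foldl_cons, hstep]
      rw [ih acc (cur ++ [t])]
      by_cases h : cur = []
      · simp [pvTail, h, simple_noun_phrase_chunking_alt, hk]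
      · simp [pvTail, h, hk]
    · have hk' : ¬g = "Noun" ∧ ¬g = "Adjective" := by
        simpa [pvKeep, not_or] using hk
      by_cases h : cur = []
      · have hstep : pvStepA (acc, cur) (t, g) = (acc, cur) := by
          simp [pvStepA, hk'.1, hk'.2, h]
        simp only [List.foldl_cons, hstep]
        rw [ih acc cur]
        simp [pvTail, h, simple_noun_phrase_chunking_alt, hk]
      · have hstep : pvStepA (acc, cur) (t, g)
            = (acc ++ [PySem.Str.join " " cur], []) := by
          simp [pvStepA, hk'.1, hk'.2, h]
        simp only [List.foldl_cons, hstep]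
        rw [ih (acc ++ [PySem.Str.join " " cur]) []]
        simp [pvTail, h, hk,
              simple_noun_phrase_chunking_alt]

-- ===== VERDICT (by name: the statement is the Claim_ definition above) =====
theorem simple_noun_phrase_chunking_spec : Claim_equal_simple_noun_phrase_chunking := by
  intro pos_tags _
  unfold Spec_simple_noun_phrase_chunking simple_noun_phrase_chunking
  simpa [pvTail] using pvMain pos_tags [] []
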